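-- pv_equiv track=rewrite | github.com/LjahinaSV/LSV | EDU/EGE/Zadanie 05/task5 v 55592_reshu ege.py | novoech
-- ===== SOURCE A (Python) =====
-- def novoech(pr):
--     for i in range (0, 3):
--         n = str(pr)
--         nechet = n.count('1') + n.count('3') + n.count('5') + n.count('7') + n.count('9')
--         chet = n.count('0') + n.count('2') + n.count('4') + n.count('6') + n.count('8')
--         if nechet > chet:
--             pr = pr*2
--         elif nechet < chet:
--             pr = pr*2 + 1
--         elif nechet ==chet:
--             if nechet%2 == 0:
--                 pr = pr*2
--             else:
--                 pr = pr*2 + 1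
--     return pr
-- ===== SOURCE B (Python) =====
-- def novoech(pr):
--     def step(p):
--         n = -p if p < 0 else p
--         bal = 0
--         odd = 0
--         while True:
--             d = n % 10
--             if d % 2 == 1:
--                 bal += 1
--                 odd += 1
--             else:
--                 bal -= 1
--             n //= 10
--             if n == 0:
--                 break
--         if bal > 0 or (bal == 0 and odd % 2 == 0):
--             return p * 2
--         return p * 2 + 1
--     return step(step(step(pr)))
-- ===== Notes on version B (the rewrite author's own statement) =====
-- stated objective: alternative
-- what changed: B never converts the number to a string: it extracts digits arithmetically (% 10, // 10) on the absolute value, maintaining a single odd-minus-even balance plus the odd count, and applies the branch as one boolean condition; the three rounds are nested calls of a step helper instead of a for loop over ten .count scans.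
import Mathlib
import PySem

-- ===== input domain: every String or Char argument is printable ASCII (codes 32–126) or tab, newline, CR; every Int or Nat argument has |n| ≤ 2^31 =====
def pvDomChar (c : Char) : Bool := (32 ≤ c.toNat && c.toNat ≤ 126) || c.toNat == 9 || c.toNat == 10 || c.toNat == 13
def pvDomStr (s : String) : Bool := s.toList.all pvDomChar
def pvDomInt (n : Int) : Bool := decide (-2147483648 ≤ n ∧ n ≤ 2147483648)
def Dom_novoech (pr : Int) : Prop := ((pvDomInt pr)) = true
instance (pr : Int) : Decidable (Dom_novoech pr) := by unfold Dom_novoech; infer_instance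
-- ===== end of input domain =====

-- B extracts digits arithmetically (% 10, // 10) on |pr| with an odd-minus-even balance,
-- never converting to a string; objective: alternative.

-- ===== PORT A =====
def novoech (pr : Int) : Int :=
  (PySem.List.pyRange 0 3 1).foldl (fun pr _ =>
    let n := PySem.Int.toStr pr
    let nechet : Int := (PySem.Str.count n "1" : Int) + (PySem.Str.count n "3" : Int) +
      (PySem.Str.count n "5" : Int) + (PySem.Str.count n "7" : Int) + (PySem.Str.count n "9" : Int)
    let chet : Int := (PySem.Str.count n "0" : Int) + (PySem.Str.count n "2" : Int) +
      (PySem.Str.count n "4" : Int) + (PySem.Str.count n "6" : Int) + (PySem.Str.count n "8" : Int)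
    if nechet > chet then pr * 2
    else if nechet < chet then pr * 2 + 1
    else if nechet = chet then
      (if PySem.Int.mod nechet 2 = 0 then pr * 2 else pr * 2 + 1)
    else pr) pr

-- ===== PORT B =====
-- the while loop of Source B's step: d = n % 10; update bal/odd; n //= 10; break when n == 0
def pvAltLoop (n : Nat) (bal odd : Int) : Int × Int :=
  let d := n % 10
  let bal' := if d % 2 = 1 then bal + 1 else bal - 1
  let odd' := if d % 2 = 1 then odd + 1 else odd
  if h : n / 10 = 0 then (bal', odd')
  else pvAltLoop (n / 10) bal' odd'
termination_by n
decreasing_by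
  exact Nat.div_lt_self (Nat.pos_of_ne_zero (fun h0 => h (by simp [h0]))) (by norm_num)

def pvAltStep (p : Int) : Int :=
  if (pvAltLoop (if p < 0 then -p else p).toNat 0 0).1 > 0
      ∨ ((pvAltLoop (if p < 0 then -p else p).toNat 0 0).1 = 0
          ∧ (pvAltLoop (if p < 0 then -p else p).toNat 0 0).2 % 2 = 0)
  then p * 2 else p * 2 + 1

def novoech_alt (pr : Int) : Int := pvAltStep (pvAltStep (pvAltStep pr))

-- ===== PRECONDITION & SPEC =====
def Spec_novoech (pr : Int) (out : Int) : Prop := out = novoech_alt pr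
instance (pr : Int) (out : Int) : Decidable (Spec_novoech pr out) := by unfold Spec_novoech; infer_instance

-- ===== CLAIM (what is proved, stated in full; the proofs are below) =====
def Claim_equal_novoech : Prop := ∀ (pr : Int), Dom_novoech pr → Spec_novoech pr (novoech pr)

-- ===== LEMMAS AND PROOFS =====

-- Chars.count with a single-character needle is List.count
theorem pv_go_single (c : Char) (s : List Char) (fuel acc : Nat) (h : s.length ≤ fuel) :
    PySem.Chars.count.go [c] fuel s acc = acc + s.count c := by
  induction s generalizing fuel acc with
  | nil => cases fuel <;> simp [PySem.Chars.count.go]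
  | cons hd tl ih =>
    cases fuel with
    | zero => simp at h
    | succ f =>
      rw [PySem.Chars.count.go]
      simp only [List.isPrefixOf, List.length_singleton]
      by_cases hc : hd = c
      · subst hc
        simp [ih _ _ (by simpa using h), Nat.add_comm]
        omega
      · simp [hc, Ne.symm hc, ih _ _ (by simpa using h)]

theorem pv_count_single (c : Char) (s : List Char) :
    PySem.Chars.count s [c] = s.count c := by
  simp [PySem.Chars.count, pv_go_single c s s.length 0 le_rfl]

-- odd-digit / even-digit counts of a char list, and per-char indicators
def pvOdd (s : List Char) : Int :=
  (s.count '1' : Int) + (s.count '3' : Int) + (s.count '5' : Int) +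
  (s.count '7' : Int) + (s.count '9' : Int)

def pvEven (s : List Char) : Int :=
  (s.count '0' : Int) + (s.count '2' : Int) + (s.count '4' : Int) +
  (s.count '6' : Int) + (s.count '8' : Int)

def pvIodd (c : Char) : Int := if 48 ≤ c.toNat ∧ c.toNat ≤ 57 ∧ c.toNat % 2 = 1 then 1 else 0
def pvIeven (c : Char) : Int := if 48 ≤ c.toNat ∧ c.toNat ≤ 57 ∧ c.toNat % 2 = 0 then 1 else 0

theorem pv_char_to_eq {c d : Char} (h : c.toNat = d.toNat) : c = d :=
  Char.ext (UInt32.toNat_inj.mp h)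

theorem pv_char_odd (c : Char) :
    pvIodd c =
    (if c = '1' then 1 else 0) + (if c = '3' then 1 else 0) + (if c = '5' then 1 else 0) +
    (if c = '7' then 1 else 0) + (if c = '9' then 1 else 0) := by
  by_cases h1 : c = '1'; · subst h1; decide
  by_cases h3 : c = '3'; · subst h3; decide
  by_cases h5 : c = '5'; · subst h5; decide
  by_cases h7 : c = '7'; · subst h7; decide
  by_cases h9 : c = '9'; · subst h9; decide
  have n1 : c.toNat ≠ 49 := fun h => h1 (pv_char_to_eq h)
  have n3 : c.toNat ≠ 51 := fun h => h3 (pv_char_to_eq h)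
  have n5 : c.toNat ≠ 53 := fun h => h5 (pv_char_to_eq h)
  have n7 : c.toNat ≠ 55 := fun h => h7 (pv_char_to_eq h)
  have n9 : c.toNat ≠ 57 := fun h => h9 (pv_char_to_eq h)
  simp only [pvIodd, h1, h3, h5, h7, h9, if_false]
  split_ifs with hd
  · omega
  · ring

theorem pv_char_even (c : Char) :
    pvIeven c =
    (if c = '0' then 1 else 0) + (if c = '2' then 1 else 0) + (if c = '4' then 1 else 0) +
    (if c = '6' then 1 else 0) + (if c = '8' then 1 else 0) := by
  by_cases h0 : c = '0'; · subst h0; decide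
  by_cases h2 : c = '2'; · subst h2; decide
  by_cases h4 : c = '4'; · subst h4; decide
  by_cases h6 : c = '6'; · subst h6; decide
  by_cases h8 : c = '8'; · subst h8; decide
  have n0 : c.toNat ≠ 48 := fun h => h0 (pv_char_to_eq h)
  have n2 : c.toNat ≠ 50 := fun h => h2 (pv_char_to_eq h)
  have n4 : c.toNat ≠ 52 := fun h => h4 (pv_char_to_eq h)
  have n6 : c.toNat ≠ 54 := fun h => h6 (pv_char_to_eq h)
  have n8 : c.toNat ≠ 56 := fun h => h8 (pv_char_to_eq h)
  simp only [pvIeven, h0, h2, h4, h6, h8, if_false]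
  split_ifs with hd
  · omega
  · ring

theorem pvOdd_cons (hd : Char) (tl : List Char) :
    pvOdd (hd :: tl) = pvIodd hd + pvOdd tl := by
  rw [pv_char_odd]
  simp only [pvOdd, List.count_cons, beq_iff_eq, Nat.cast_add, Nat.cast_ite,
    Nat.cast_one, Nat.cast_zero]
  ring

theorem pvEven_cons (hd : Char) (tl : List Char) :
    pvEven (hd :: tl) = pvIeven hd + pvEven tl := by
  rw [pv_char_even]
  simp only [pvEven, List.count_cons, beq_iff_eq, Nat.cast_add, Nat.cast_ite,
    Nat.cast_one, Nat.cast_zero]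
  ring

-- digitChar of a base-10 digit: its odd/even indicators match the digit's parity
theorem pv_digitChar_odd (d : Nat) (hd : d < 10) :
    pvIodd (Nat.digitChar d) = (if d % 2 = 1 then 1 else 0) := by
  interval_cases d <;> decide

theorem pv_digitChar_even (d : Nat) (hd : d < 10) :
    pvIeven (Nat.digitChar d) = (if d % 2 = 1 then 0 else 1) := by
  interval_cases d <;> decide

-- accumulator shift for B's digit loop
theorem pvAltLoop_shift (n : Nat) (bal odd : Int) :
    pvAltLoop n bal odd = (bal + (pvAltLoop n 0 0).1, odd + (pvAltLoop n 0 0).2) := by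
  induction n using Nat.strong_induction_on generalizing bal odd with
  | _ n ih =>
    conv_lhs => rw [pvAltLoop]
    conv_rhs => rw [pvAltLoop]
    by_cases h : n / 10 = 0
    · simp only [h, dif_pos]
      split_ifs <;> refine Prod.ext ?_ ?_ <;> simp <;> ring
    · simp only [h, dif_neg, not_false_iff]
      have hlt : n / 10 < n :=
        Nat.div_lt_self (Nat.pos_of_ne_zero (fun h0 => h (by simp [h0]))) (by norm_num)
      split_ifs with hpar
      · rw [ih _ hlt (bal + 1) (odd + 1), ih _ hlt (0 + 1) (0 + 1)]
        refine Prod.ext ?_ ?_ <;> simp <;> omega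
      · rw [ih _ hlt (bal - 1) odd, ih _ hlt (0 - 1) 0]
        refine Prod.ext ?_ ?_ <;> simp <;> omega

-- the counts of Nat.toDigitsCore's output are exactly what B's digit loop computes
theorem pv_core_counts (fuel : Nat) :
    ∀ (n : Nat) (acc : List Char), n < fuel →
    pvOdd (Nat.toDigitsCore 10 fuel n acc) = (pvAltLoop n 0 0).2 + pvOdd acc ∧
    pvOdd (Nat.toDigitsCore 10 fuel n acc) - pvEven (Nat.toDigitsCore 10 fuel n acc) =
      (pvAltLoop n 0 0).1 + pvOdd acc - pvEven acc := by
  induction fuel with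
  | zero => intro n acc h; omega
  | succ f ih =>
    intro n acc h
    rw [Nat.toDigitsCore, pvAltLoop]
    by_cases h0 : n / 10 = 0
    · simp only [h0, if_pos, dif_pos]
      have hd : n % 10 < 10 := Nat.mod_lt _ (by norm_num)
      rw [pvOdd_cons, pvEven_cons, pv_digitChar_odd _ hd, pv_digitChar_even _ hd]
      split_ifs <;> simp <;> ring
    · simp only [h0, if_neg, dif_neg, not_false_iff]
      have hn : 0 < n := Nat.pos_of_ne_zero (fun hh => h0 (by simp [hh]))
      have hlt : n / 10 < f := lt_of_lt_of_le (Nat.div_lt_self hn (by norm_num)) (by omega)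
      obtain ⟨ih1, ih2⟩ := ih (n / 10) (Nat.digitChar (n % 10) :: acc) hlt
      have hd : n % 10 < 10 := Nat.mod_lt _ (by norm_num)
      rw [pvOdd_cons, pv_digitChar_odd _ hd] at ih1
      rw [pvOdd_cons, pvEven_cons, pv_digitChar_odd _ hd, pv_digitChar_even _ hd] at ih2
      rw [pvAltLoop_shift]
      refine ⟨?_, ?_⟩ <;> split_ifs at * <;> simp at * <;> omega

-- the counts of str(p)'s characters, via B's loop on |p|
theorem pv_toChars_counts (p : Int) :
    pvOdd (PySem.Int.toChars p) = (pvAltLoop p.natAbs 0 0).2 ∧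
    pvOdd (PySem.Int.toChars p) - pvEven (PySem.Int.toChars p) = (pvAltLoop p.natAbs 0 0).1 := by
  have base : ∀ m : Nat,
      pvOdd (Nat.toDigits 10 m) = (pvAltLoop m 0 0).2 ∧
      pvOdd (Nat.toDigits 10 m) - pvEven (Nat.toDigits 10 m) = (pvAltLoop m 0 0).1 := by
    intro m
    have := pv_core_counts (m + 1) m [] (by omega)
    simpa [Nat.toDigits, pvOdd, pvEven] using this
  unfold PySem.Int.toChars
  by_cases hneg : p < 0
  · simp only [hneg, if_pos]
    obtain ⟨b1, b2⟩ := base p.natAbs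
    rw [pvOdd_cons, pvEven_cons]
    constructor
    · rw [show pvIodd '-' = 0 from rfl]; omega
    · rw [show pvIodd '-' = 0 from rfl, show pvIeven '-' = 0 from rfl]; omega
  · simp only [hneg, if_neg, not_false_iff]
    have : p.toNat = p.natAbs := by omega
    rw [this]; exact base p.natAbs

-- one round of A equals one step of B
theorem pv_round_eq (p : Int) :
    (let n := PySem.Int.toStr p
     let nechet : Int := (PySem.Str.count n "1" : Int) + (PySem.Str.count n "3" : Int) +
       (PySem.Str.count n "5" : Int) + (PySem.Str.count n "7" : Int) + (PySem.Str.count n "9" : Int)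
     let chet : Int := (PySem.Str.count n "0" : Int) + (PySem.Str.count n "2" : Int) +
       (PySem.Str.count n "4" : Int) + (PySem.Str.count n "6" : Int) + (PySem.Str.count n "8" : Int)
     if nechet > chet then p * 2
     else if nechet < chet then p * 2 + 1
     else if nechet = chet then
       (if PySem.Int.mod nechet 2 = 0 then p * 2 else p * 2 + 1)
     else p) = pvAltStep p := by
  simp only [PySem.Str.count_eq, PySem.Int.toList_toStr,
    show ("1" : String).toList = ['1'] from rfl, show ("3" : String).toList = ['3'] from rfl,
    show ("5" : String).toList = ['5'] from rfl, show ("7" : String).toList = ['7'] from rfl,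
    show ("9" : String).toList = ['9'] from rfl, show ("0" : String).toList = ['0'] from rfl,
    show ("2" : String).toList = ['2'] from rfl, show ("4" : String).toList = ['4'] from rfl,
    show ("6" : String).toList = ['6'] from rfl, show ("8" : String).toList = ['8'] from rfl,
    pv_count_single]
  set s := PySem.Int.toChars p with hs
  have hO : (s.count '1' : Int) + (s.count '3' : Int) + (s.count '5' : Int) +
      (s.count '7' : Int) + (s.count '9' : Int) = pvOdd s := rfl
  have hE : (s.count '0' : Int) + (s.count '2' : Int) + (s.count '4' : Int) +
      (s.count '6' : Int) + (s.count '8' : Int) = pvEven s := rfl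
  rw [hO, hE]
  obtain ⟨c1, c2⟩ := pv_toChars_counts p
  rw [← hs] at c1 c2
  unfold pvAltStep
  have habs : (if p < 0 then -p else p).toNat = p.natAbs := by
    split_ifs with hp <;> omega
  rw [habs]
  rw [PySem.Int.mod_eq_emod_of_pos (by norm_num)]
  have hOnn : 0 ≤ pvOdd s := by unfold pvOdd; positivity
  have hEnn : 0 ≤ pvEven s := by unfold pvEven; positivity
  set bal := (pvAltLoop p.natAbs 0 0).1
  set odd := (pvAltLoop p.natAbs 0 0).2
  split_ifs <;> omega

-- ===== VERDICT (by name: the statement is the Claim_ definition above) =====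
theorem novoech_spec : Claim_equal_novoech := by
  intro pr _
  unfold Spec_novoech novoech novoech_alt
  rw [show PySem.List.pyRange 0 3 1 = [0, 1, 2] from rfl]
  simp only [List.foldl_cons, List.foldl_nil, pv_round_eq]
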